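-- pv_equiv track=rewrite | github.com/inaciovasquez2020/chronos-urf-rr | toolkit/oblivion/scripts/cycle_signature_scaling.py | cycle_intersection_signature
-- ===== SOURCE A (Python) =====
-- def cycle_intersection_signature(v, cycles):
--     sig = []
--
--     for i in range(len(cycles)):
--         if v not in cycles[i]:
--             continue
--
--         for j in range(i + 1, len(cycles)):
--             if v in cycles[j]:
--                 if set(cycles[i]) & set(cycles[j]):
--                     sig.append((i, j))
--
--     return tuple(sorted(sig))
-- ===== SOURCE B (Python) =====
-- def cycle_intersection_signature(v, cycles):
--     # Any two cycles that both contain v intersect (at v), so A's per-pair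
--     # set-intersection test is redundant: collect the indices whose cycle
--     # contains v, once, and emit all increasing pairs of them directly
--     # (they come out already in sorted order, so no sort is needed).
--     idxs = [i for i in range(len(cycles)) if v in cycles[i]]
--     out = []
--     rest = idxs
--     while rest:
--         x, rest = rest[0], rest[1:]
--         out += [(x, y) for y in rest]
--     return tuple(out)
-- ===== Notes on version B (the rewrite author's own statement) =====
-- stated objective: alternative
-- what changed: Instead of scanning all pairs j>i, rebuilding set(cycles[i])&set(cycles[j]) per pair and sorting at the end, B collects the indices containing v in one pass and emits all increasing pairs of them directly (two cycles containing v always intersect, and the pairs come out already sorted).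
import Mathlib
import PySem

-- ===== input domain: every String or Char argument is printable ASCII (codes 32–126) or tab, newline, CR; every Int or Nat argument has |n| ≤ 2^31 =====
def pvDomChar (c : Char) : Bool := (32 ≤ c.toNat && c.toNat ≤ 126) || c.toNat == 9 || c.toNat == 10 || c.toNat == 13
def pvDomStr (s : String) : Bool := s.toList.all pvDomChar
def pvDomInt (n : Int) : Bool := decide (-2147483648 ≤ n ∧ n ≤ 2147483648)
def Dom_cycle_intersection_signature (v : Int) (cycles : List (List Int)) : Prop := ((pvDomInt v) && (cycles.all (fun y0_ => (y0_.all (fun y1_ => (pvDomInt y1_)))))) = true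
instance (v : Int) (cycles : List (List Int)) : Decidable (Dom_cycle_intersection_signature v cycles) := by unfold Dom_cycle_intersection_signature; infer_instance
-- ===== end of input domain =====

-- B: alternative algorithm — one pass collects the indices whose cycle contains v, then all
-- increasing pairs of them are emitted directly (two cycles containing v always share v, so
-- A's per-pair set-intersection test is redundant, and the pairs arrive already sorted).

-- ===== PORT A =====
def cycle_intersection_signature (v : Int) (cycles : List (List Int)) : List (Int × Int) :=
  let n : Int := (cycles.length : Int)
  let sig := (PySem.List.pyRange 0 n 1).foldl (fun sig i =>
    let ci := PySem.List.pyGetD cycles i []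
    if v ∈ ci then
      (PySem.List.pyRange (i + 1) n 1).foldl (fun sig j =>
        let cj := PySem.List.pyGetD cycles j []
        if v ∈ cj then
          if ((PySem.Set.ofList ci).inter (PySem.Set.ofList cj)).isEmpty = false then
            sig ++ [(i, j)]
          else sig
        else sig) sig
    else sig) []
  PySem.List.sorted2 sig Prod.fst Prod.snd false

-- ===== PORT B =====
-- the while-loop of Source B: head/tail recursion over the remaining index list
def pvPairsAux : List Int → List (Int × Int)
  | [] => []
  | x :: rest => rest.map (fun y => (x, y)) ++ pvPairsAux rest

def cycle_intersection_signature_alt (v : Int) (cycles : List (List Int)) : List (Int × Int) :=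
  let idxs := (PySem.List.pyRange 0 (cycles.length : Int) 1).filter
      (fun i => decide (v ∈ PySem.List.pyGetD cycles i []))
  pvPairsAux idxs

-- ===== PRECONDITION & SPEC =====
def Spec_cycle_intersection_signature (v : Int) (cycles : List (List Int)) (out : List (Int × Int)) : Prop := out = cycle_intersection_signature_alt v cycles
instance (v : Int) (cycles : List (List Int)) (out : List (Int × Int)) : Decidable (Spec_cycle_intersection_signature v cycles out) := by unfold Spec_cycle_intersection_signature; infer_instance

-- ===== CLAIM (what is proved, stated in full; the proofs are below) =====
def Claim_equal_cycle_intersection_signature : Prop := ∀ (v : Int) (cycles : List (List Int)), Dom_cycle_intersection_signature v cycles → Spec_cycle_intersection_signature v cycles (cycle_intersection_signature v cycles)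

-- ===== LEMMAS AND PROOFS =====

-- the index list B filters out, starting from position a
def pvIdxs (v : Int) (cycles : List (List Int)) (a : Int) : List Int :=
  (PySem.List.pyRange a (cycles.length : Int) 1).filter
    (fun i => decide (v ∈ PySem.List.pyGetD cycles i []))

-- A's inner loop, once v ∈ cycles[i] is known: appends (i, j) for each later j containing v
lemma pv_inner_eq (v : Int) (cycles : List (List Int)) (i : Int)
    (hv : v ∈ PySem.List.pyGetD cycles i []) (acc : List (Int × Int)) :
    (PySem.List.pyRange (i + 1) (cycles.length : Int) 1).foldl (fun sig j =>
        let cj := PySem.List.pyGetD cycles j []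
        if v ∈ cj then
          if ((PySem.Set.ofList (PySem.List.pyGetD cycles i [])).inter (PySem.Set.ofList cj)).isEmpty = false then
            sig ++ [(i, j)]
          else sig
        else sig) acc
      = acc ++ (pvIdxs v cycles (i + 1)).map (fun j => (i, j)) := by
  rw [PySem.List.foldl_congr_mem _ _
      (fun sig j => if decide (v ∈ PySem.List.pyGetD cycles j []) = true then sig ++ [(i, j)] else sig) _ ?_]
  · rw [PySem.List.foldl_append_if]
    rfl
  · intro acc' j _
    simp only [decide_eq_true_eq]
    by_cases hj : v ∈ PySem.List.pyGetD cycles j []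
    · simp only [hj, if_true]
      have hne : ((PySem.Set.ofList (PySem.List.pyGetD cycles i [])).inter
          (PySem.Set.ofList (PySem.List.pyGetD cycles j []))).isEmpty = false := by
        rcases h : ((PySem.Set.ofList (PySem.List.pyGetD cycles i [])).inter
            (PySem.Set.ofList (PySem.List.pyGetD cycles j []))).isEmpty with _ | _
        · rfl
        · exfalso
          have := List.isEmpty_iff.mp h
          have hv' : v ∈ (PySem.Set.ofList (PySem.List.pyGetD cycles i [])).inter
              (PySem.Set.ofList (PySem.List.pyGetD cycles j [])) := by
            rw [PySem.Set.mem_inter, PySem.Set.mem_ofList, PySem.Set.mem_ofList]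
            exact ⟨hv, hj⟩
          rw [this] at hv'
          exact List.not_mem_nil hv'
      rw [hne]
      simp
    · simp [hj]

-- one step of pvIdxs
lemma pvIdxs_cons (v : Int) (cycles : List (List Int)) (a : Int)
    (ha : a < (cycles.length : Int)) :
    pvIdxs v cycles a =
      (if v ∈ PySem.List.pyGetD cycles a [] then [a] else []) ++ pvIdxs v cycles (a + 1) := by
  unfold pvIdxs
  rw [PySem.List.pyRange_one_cons ha, List.filter_cons]
  by_cases h : v ∈ PySem.List.pyGetD cycles a [] <;> simp [h]

lemma pvIdxs_nil (v : Int) (cycles : List (List Int)) (a : Int)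
    (ha : (cycles.length : Int) ≤ a) : pvIdxs v cycles a = [] := by
  unfold pvIdxs
  rw [PySem.List.pyRange_one_eq_nil ha]
  rfl

-- A's outer loop from position a equals acc ++ pvPairsAux of the remaining index list
lemma pv_outer_eq (v : Int) (cycles : List (List Int)) :
    ∀ (k : Nat) (a : Int) (acc : List (Int × Int)),
    ((cycles.length : Int) - a).toNat ≤ k →
    (PySem.List.pyRange a (cycles.length : Int) 1).foldl (fun sig i =>
        let ci := PySem.List.pyGetD cycles i []
        if v ∈ ci then
          (PySem.List.pyRange (i + 1) (cycles.length : Int) 1).foldl (fun sig j =>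
            let cj := PySem.List.pyGetD cycles j []
            if v ∈ cj then
              if ((PySem.Set.ofList ci).inter (PySem.Set.ofList cj)).isEmpty = false then
                sig ++ [(i, j)]
              else sig
            else sig) sig
        else sig) acc
      = acc ++ pvPairsAux (pvIdxs v cycles a) := by
  intro k
  induction k with
  | zero =>
    intro a acc hk
    have ha : (cycles.length : Int) ≤ a := by omega
    rw [PySem.List.pyRange_one_eq_nil ha, pvIdxs_nil v cycles a ha]
    simp [pvPairsAux]
  | succ k ih =>
    intro a acc hk
    by_cases ha : a < (cycles.length : Int)
    · rw [PySem.List.pyRange_one_cons ha, List.foldl_cons]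
      simp only []
      rw [pvIdxs_cons v cycles a ha]
      by_cases hv : v ∈ PySem.List.pyGetD cycles a []
      · simp only [hv, if_true]
        rw [pv_inner_eq v cycles a hv acc]
        rw [ih (a + 1) _ (by omega)]
        simp [pvPairsAux, List.append_assoc]
      · simp only [hv, if_false]
        rw [ih (a + 1) acc (by omega)]
        simp
    · have ha' : (cycles.length : Int) ≤ a := by omega
      rw [PySem.List.pyRange_one_eq_nil ha', pvIdxs_nil v cycles a ha']
      simp [pvPairsAux]

-- membership in pvPairsAux
lemma pv_mem_pairsAux {l : List Int} {p : Int × Int} (h : p ∈ pvPairsAux l) : p.1 ∈ l := by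
  induction l with
  | nil => simp [pvPairsAux] at h
  | cons x rest ih =>
    simp only [pvPairsAux, List.mem_append, List.mem_map] at h
    rcases h with ⟨y, _, rfl⟩ | h
    · exact List.mem_cons_self
    · exact List.mem_cons_of_mem _ (ih h)

-- pairsAux of a strictly increasing list is strictly lexicographically increasing
lemma pv_pairsAux_pairwise {l : List Int} (h : l.Pairwise (· < ·)) :
    (pvPairsAux l).Pairwise (fun p q => p.1 < q.1 ∨ (p.1 = q.1 ∧ p.2 < q.2)) := by
  induction l with
  | nil => simp [pvPairsAux]
  | cons x rest ih =>
    rcases List.pairwise_cons.mp h with ⟨hx, hrest⟩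
    simp only [pvPairsAux]
    rw [List.pairwise_append]
    refine ⟨?_, ih hrest, ?_⟩
    · exact List.Pairwise.map _ (fun a b hab => Or.inr ⟨rfl, hab⟩) hrest
    · intro p hp q hq
      rcases List.mem_map.mp hp with ⟨y, _, rfl⟩
      exact Or.inl (hx _ (pv_mem_pairsAux hq))

-- sorted2 with keys (fst, snd) leaves a strictly lex-increasing list unchanged
lemma pv_sorted2_eq_self {xs : List (Int × Int)}
    (h : xs.Pairwise (fun p q => p.1 < q.1 ∨ (p.1 = q.1 ∧ p.2 < q.2))) :
    PySem.List.sorted2 xs Prod.fst Prod.snd false = xs := by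
  show List.foldl (fun acc x => PySem.List.insertBy
      (fun a b => decide (a.1 < b.1) || (!decide (b.1 < a.1) && decide (a.2 < b.2))) x acc) [] xs = xs
  suffices H : ∀ (l acc : List (Int × Int)),
      l.Pairwise (fun p q => p.1 < q.1 ∨ (p.1 = q.1 ∧ p.2 < q.2)) →
      (∀ x ∈ l, ∀ y ∈ acc,
        (decide (x.1 < y.1) || (!decide (y.1 < x.1) && decide (x.2 < y.2))) = false) →
      List.foldl (fun acc x => PySem.List.insertBy
        (fun a b => decide (a.1 < b.1) || (!decide (b.1 < a.1) && decide (a.2 < b.2))) x acc) acc l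
        = acc ++ l by
    have := H xs [] h (by intro x _ y hy; simp at hy)
    simpa using this
  intro l
  induction l with
  | nil => intro acc _ _; simp
  | cons x rest ih =>
    intro acc hpw hacc
    rcases List.pairwise_cons.mp hpw with ⟨hx, hrest⟩
    rw [List.foldl_cons,
      PySem.List.insertBy_of_forall_not_before _ _ _ (fun y hy => hacc x List.mem_cons_self y hy)]
    rw [ih (acc ++ [x]) hrest ?_]
    · simp
    · intro z hz y hy
      rcases List.mem_append.mp hy with hy | hy
      · exact hacc z (List.mem_cons_of_mem _ hz) y hy
      · have hxy : y = x := by simpa using hy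
        subst hxy
        rcases hx z hz with h1 | ⟨h1, h2⟩
        · simp [not_lt_of_gt h1]
          omega
        · rw [h1]
          simp
          omega

lemma pv_idxs_pairwise (v : Int) (cycles : List (List Int)) :
    (pvIdxs v cycles 0).Pairwise (· < ·) :=
  List.Pairwise.filter _ (PySem.List.pairwise_lt_pyRange_one 0 (cycles.length : Int))

-- ===== VERDICT (by name: the statement is the Claim_ definition above) =====
theorem cycle_intersection_signature_spec : Claim_equal_cycle_intersection_signature := by
  intro v cycles _
  unfold Spec_cycle_intersection_signature cycle_intersection_signature cycle_intersection_signature_alt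
  simp only []
  rw [pv_outer_eq v cycles (((cycles.length : Int) - 0).toNat) 0 [] (le_refl _)]
  rw [List.nil_append]
  exact pv_sorted2_eq_self (pv_pairsAux_pairwise (pv_idxs_pairwise v cycles))
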